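-- pv_equiv track=rewrite | github.com/jfmam/coding-test | class1/8958.py | solution
-- ===== SOURCE A (Python) =====
-- def solution(s):
--     acc = 0
--     point = 0
--     for i in list(s):
--         if i=='O':
--             acc += 1
--             point += acc
--         else:
--             acc = 0
--     return point
-- ===== SOURCE B (Python) =====
-- def solution(s):
--     total = 0
--     i = 0
--     n = len(s)
--     while i < n:
--         if s[i] != 'O':
--             i += 1
--         else:
--             j = i
--             while j < n and s[j] == 'O':
--                 j += 1
--             L = j - i
--             total += L * (L + 1) // 2
--             i = j
--     return total
-- ===== Notes on version B (the rewrite author's own statement) =====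
-- stated objective: alternative
-- what changed: Replaces the per-character running accumulator with a run-scanner: each maximal run of 'O' of length L contributes the closed-form triangular number L*(L+1)//2, non-'O' characters are skipped.
import Mathlib
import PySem

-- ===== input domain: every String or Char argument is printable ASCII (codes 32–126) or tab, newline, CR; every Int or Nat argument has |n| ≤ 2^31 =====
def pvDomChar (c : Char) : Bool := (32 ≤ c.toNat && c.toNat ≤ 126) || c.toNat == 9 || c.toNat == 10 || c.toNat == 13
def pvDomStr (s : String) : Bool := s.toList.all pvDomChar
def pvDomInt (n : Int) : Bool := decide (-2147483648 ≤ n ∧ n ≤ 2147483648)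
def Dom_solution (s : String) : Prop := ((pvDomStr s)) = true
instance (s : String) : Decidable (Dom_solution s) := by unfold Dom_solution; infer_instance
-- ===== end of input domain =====

-- B replaces A's per-character running accumulator by scanning maximal runs of 'O'
-- and adding the closed-form triangular number L*(L+1)//2 per run (alternative decomposition).

-- ===== PORT A =====
-- A: one pass, state (acc, point); 'O' bumps acc and adds it to point, otherwise acc resets.
def solution (s : String) : Int :=
  (s.toList.foldl
    (fun (st : Int × Int) (i : Char) =>
      if i = 'O' then (st.1 + 1, st.2 + (st.1 + 1)) else (0, st.2))
    (0, 0)).2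

-- ===== PORT B =====
-- B: skip non-'O' chars; at an 'O', measure the whole run (the inner while-loop of Source B,
-- here the takeWhile/dropWhile of the maximal 'O'-prefix), add L*(L+1)//2, continue after it.
def solutionAltGo : List Char → Int
  | [] => 0
  | c :: rest =>
    if c ≠ 'O' then solutionAltGo rest
    else
      let L : Int := 1 + (rest.takeWhile (· = 'O')).length
      L * (L + 1) / 2 + solutionAltGo (rest.dropWhile (· = 'O'))
termination_by l => l.length
decreasing_by
  · simp
  · exact Nat.lt_succ_of_le (rest.length_dropWhile_le _)

def solution_alt (s : String) : Int := solutionAltGo s.toList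

-- ===== PRECONDITION & SPEC =====
def Spec_solution (s : String) (out : Int) : Prop := out = solution_alt s
instance (s : String) (out : Int) : Decidable (Spec_solution s out) := by unfold Spec_solution; infer_instance

-- ===== CLAIM (what is proved, stated in full; the proofs are below) =====
def Claim_equal_solution : Prop := ∀ (s : String), Dom_solution s → Spec_solution s (solution s)

-- ===== LEMMAS AND PROOFS =====

-- contribution of the remaining characters given the current streak value `a`
def gAux : List Char → Int → Int
  | [], _ => 0
  | c :: l, a => if c = 'O' then (a + 1) + gAux l (a + 1) else gAux l 0

def tri (x : Int) : Int := x * (x + 1) / 2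

theorem tri_succ (a : Int) : tri (a + 1) = tri a + (a + 1) := by
  obtain ⟨m, hm⟩ : ∃ m, a * (a + 1) = 2 * m := by
    rcases Int.even_or_odd a with ⟨k, hk⟩ | ⟨k, hk⟩
    · exact ⟨k * (a + 1), by rw [hk]; ring⟩
    · exact ⟨a * (k + 1), by rw [hk]; ring⟩
  have h2 : (a + 1) * (a + 1 + 1) = 2 * (m + (a + 1)) := by
    have : (a + 1) * (a + 1 + 1) = a * (a + 1) + 2 * (a + 1) := by ring
    omega
  simp [tri, hm, h2]

theorem foldA_eq_gAux (l : List Char) (a p : Int) :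
    (l.foldl
      (fun (st : Int × Int) (i : Char) =>
        if i = 'O' then (st.1 + 1, st.2 + (st.1 + 1)) else (0, st.2))
      (a, p)).2 = p + gAux l a := by
  induction l generalizing a p with
  | nil => simp [gAux]
  | cons c l ih =>
    by_cases h : c = 'O' <;> (simp [gAux, h, ih]; try ring)

theorem gAux_run (l : List Char) (a : Int) :
    gAux l a = (tri (a + (l.takeWhile (· = 'O')).length) - tri a)
      + gAux (l.dropWhile (· = 'O')) 0 := by
  induction l generalizing a with
  | nil => simp [gAux]
  | cons c l ih =>
    by_cases h : c = 'O'
    · simp only [gAux, h, List.takeWhile_cons, List.dropWhile_cons, decide_eq_true_eq,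
        if_pos trivial, if_true, List.length_cons]
      rw [ih (a + 1)]
      have := tri_succ a
      push_cast
      have harr : a + (↑(l.takeWhile (· = 'O')).length + 1)
          = a + 1 + ↑(l.takeWhile (· = 'O')).length := by ring
      rw [harr]
      linarith [this]
    · simp [gAux, h]

theorem gAux_zero_eq_altGo (l : List Char) : gAux l 0 = solutionAltGo l := by
  induction l using solutionAltGo.induct with
  | case1 => simp [gAux, solutionAltGo]
  | case2 c rest h ih =>
    have h' : c ≠ 'O' := by simpa using h
    simpa [gAux, h', solutionAltGo] using ih
  | case3 c rest h ih =>
    have h' : c = 'O' := by by_contra hc; exact h (by simpa using hc)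
    rw [solutionAltGo]
    simp only [gAux, h', if_neg (show ¬('O' : Char) ≠ 'O' by simp), if_true]
    have h01 : (0 : Int) + 1 = 1 := rfl
    rw [h01, gAux_run rest 1, ih]
    have htri : tri 1 = 1 := by decide
    have hdef : tri (1 + ((rest.takeWhile (· = 'O')).length : Int))
        = (1 + ((rest.takeWhile (· = 'O')).length : Int))
          * (1 + ((rest.takeWhile (· = 'O')).length : Int) + 1) / 2 := rfl
    rw [← hdef]
    linarith [htri]

-- ===== VERDICT (by name: the statement is the Claim_ definition above) =====
theorem solution_spec : Claim_equal_solution := by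
  intro s _
  unfold Spec_solution solution solution_alt
  rw [foldA_eq_gAux, gAux_zero_eq_altGo]
  ring
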